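-- pv_equiv track=rewrite | github.com/anarsinagrid/FUNSD_FormEditor | LayoutLM/onnx_coreml_pipeline.py | _collapse_pred_labels
-- ===== SOURCE A (Python) =====
-- from typing import Any, Dict, Generator, Iterable, List, Optional, Tuple
--
-- def _collapse_pred_labels(
--     pred_ids: List[int],
--     token_labels: List[int],
--     word_ids: List[Optional[int]],
--     label_list: List[str],
-- ) -> List[str]:
--     prev = None
--     out = []
--     for pos, wid in enumerate(word_ids):
--         if wid is None:
--             continue
--         if wid != prev:
--             if token_labels[pos] != -100:
--                 pred_idx = pred_ids[pos] if pos < len(pred_ids) else 0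
--                 out.append(label_list[pred_idx])
--             prev = wid
--     return out
-- ===== SOURCE B (Python) =====
-- from typing import List, Optional
--
--
-- def _collapse_pred_labels(
--     pred_ids: List[int],
--     token_labels: List[int],
--     word_ids: List[Optional[int]],
--     label_list: List[str],
-- ) -> List[str]:
--     # Run-skipping scan (groupby-style): filter out None positions once, then an
--     # outer loop that, at each run head, emits (at most) one label and an inner
--     # loop that skips the whole maximal run of equal word-ids.  No prev-state
--     # variable and no per-token comparison against a carried value.
--     indexed = [(i, w) for i, w in enumerate(word_ids) if w is not None]
--     n = len(indexed)
--     out = []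
--     k = 0
--     while k < n:
--         pos, wid = indexed[k]
--         if token_labels[pos] != -100:
--             pred_idx = pred_ids[pos] if pos < len(pred_ids) else 0
--             out.append(label_list[pred_idx])
--         while k < n and indexed[k][1] == wid:
--             k += 1
--     return out
-- ===== Notes on version B (the rewrite author's own statement) =====
-- stated objective: alternative
-- what changed: Replaces A's single pass with a carried prev variable compared at every token by a run-skipping two-level scan: filter the non-None (pos, wid) pairs once, then an outer loop that emits one label at each run head and an inner loop that jumps over the whole maximal run of equal word-ids, so no previous-id state is threaded through the traversal.
-- outside the precondition, e.g. on _collapse_pred_labels([0], [5], [None, 0], ['X']): A raises IndexError, B raises IndexError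
import Mathlib
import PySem

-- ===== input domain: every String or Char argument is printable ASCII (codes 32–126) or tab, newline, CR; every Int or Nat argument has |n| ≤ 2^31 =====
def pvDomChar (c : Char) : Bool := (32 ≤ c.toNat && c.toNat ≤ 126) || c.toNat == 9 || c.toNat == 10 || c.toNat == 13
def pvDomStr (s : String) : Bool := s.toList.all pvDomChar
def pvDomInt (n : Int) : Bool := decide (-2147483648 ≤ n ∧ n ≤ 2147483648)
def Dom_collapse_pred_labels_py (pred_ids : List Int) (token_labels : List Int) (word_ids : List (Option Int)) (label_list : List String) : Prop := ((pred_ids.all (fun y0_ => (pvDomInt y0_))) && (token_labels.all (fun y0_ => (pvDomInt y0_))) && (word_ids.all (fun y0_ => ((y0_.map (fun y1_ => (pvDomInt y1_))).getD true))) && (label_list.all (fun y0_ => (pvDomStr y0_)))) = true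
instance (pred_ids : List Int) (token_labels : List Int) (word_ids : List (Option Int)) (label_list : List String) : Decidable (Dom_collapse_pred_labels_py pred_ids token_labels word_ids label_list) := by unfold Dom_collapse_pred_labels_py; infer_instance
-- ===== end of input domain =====

-- ===== PORT A =====

-- B replaces A's prev-state single pass by a run-skipping two-level scan over the
-- filtered non-None positions (objective: alternative, same O(n) cost; return value only).

-- ===== PORT A =====
-- A's for-loop over enumerate(word_ids) with the mutable `prev`/`out` state; the indexings
-- token_labels[pos] / label_list[pred_idx] are pyGet? with a default that is only reached
-- outside Pre_ (where Python raises IndexError).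
def pvLoopA (pred_ids : List Int) (token_labels : List Int) (label_list : List String) :
    List (Int × Option Int) → Option Int → List String
  | [], _ => []
  | (pos, wid) :: rest, prev =>
    match wid with
    | none => pvLoopA pred_ids token_labels label_list rest prev
    | some w =>
      if some w ≠ prev then
        if (PySem.List.pyGet? token_labels pos).getD (-100) ≠ -100 then
          (PySem.List.pyGet? label_list
              (if pos < (pred_ids.length : Int) then (PySem.List.pyGet? pred_ids pos).getD 0 else 0)).getD ""
            :: pvLoopA pred_ids token_labels label_list rest (some w)
        else pvLoopA pred_ids token_labels label_list rest (some w)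
      else pvLoopA pred_ids token_labels label_list rest prev

def collapse_pred_labels_py (pred_ids : List Int) (token_labels : List Int) (word_ids : List (Option Int)) (label_list : List String) : List String :=
  pvLoopA pred_ids token_labels label_list (PySem.List.enumerate word_ids) none

-- ===== PORT B =====
-- Source B's run-head emission (the -100 guard and label lookup at one position).
def pvRunEmit (pred_ids : List Int) (token_labels : List Int) (label_list : List String) (pos : Int) : Option String :=
  if (PySem.List.pyGet? token_labels pos).getD (-100) ≠ -100 then
    some ((PySem.List.pyGet? label_list
        (if pos < (pred_ids.length : Int) then (PySem.List.pyGet? pred_ids pos).getD 0 else 0)).getD "")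
  else none

-- Source B's outer while-loop: emit at the run head, then the inner while-loop skips the
-- maximal run of equal word-ids (= dropWhile on the tail).
def pvRunsLoop (pred_ids : List Int) (token_labels : List Int) (label_list : List String) :
    List (Int × Int) → List String
  | [] => []
  | (pos, wid) :: rest =>
    let tail := pvRunsLoop pred_ids token_labels label_list (rest.dropWhile (fun p => p.2 == wid))
    match pvRunEmit pred_ids token_labels label_list pos with
    | some s => s :: tail
    | none => tail
  termination_by l => l.length
  decreasing_by simpa using Nat.lt_succ_of_le (List.length_dropWhile_le _ _)

def collapse_pred_labels_py_alt (pred_ids : List Int) (token_labels : List Int) (word_ids : List (Option Int)) (label_list : List String) : List String :=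
  pvRunsLoop pred_ids token_labels label_list
    ((PySem.List.enumerate word_ids).filterMap (fun p => p.2.map (fun w => (p.1, w))))

-- ===== PRECONDITION & SPEC =====
-- Pre_ excludes exactly the inputs where Python A raises IndexError: at a run-first position k
-- (word_ids[k] is a non-None id differing from the LAST non-None id before k), either k is
-- beyond token_labels, or the predicted index used there is outside label_list's index range.
def Pre_collapse_pred_labels_py (pred_ids : List Int) (token_labels : List Int) (word_ids : List (Option Int)) (label_list : List String) : Prop :=
  ∀ k : Nat, k < word_ids.length →
    ∀ w ∈ word_ids.getD k none,
      ((word_ids.take k).filterMap id).getLast? ≠ some w →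
        (k : Int) < (token_labels.length : Int) ∧
        ((PySem.List.pyGet? token_labels (k : Int)).getD (-100) ≠ -100 →
          PySem.Raise.InRange label_list.length
            (if (k : Int) < (pred_ids.length : Int) then (PySem.List.pyGet? pred_ids (k : Int)).getD 0 else 0))
instance (pred_ids : List Int) (token_labels : List Int) (word_ids : List (Option Int)) (label_list : List String) : Decidable (Pre_collapse_pred_labels_py pred_ids token_labels word_ids label_list) := by unfold Pre_collapse_pred_labels_py; infer_instance

def pvWitness_collapse_pred_labels_py : List Int × List Int × List (Option Int) × List String :=
  ([0, 1], [0, -100, 1], [some 0, none, some 1], ["B-Q", "I-Q"])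

def Spec_collapse_pred_labels_py (pred_ids : List Int) (token_labels : List Int) (word_ids : List (Option Int)) (label_list : List String) (out : List String) : Prop := out = collapse_pred_labels_py_alt pred_ids token_labels word_ids label_list
instance (pred_ids : List Int) (token_labels : List Int) (word_ids : List (Option Int)) (label_list : List String) (out : List String) : Decidable (Spec_collapse_pred_labels_py pred_ids token_labels word_ids label_list out) := by unfold Spec_collapse_pred_labels_py; infer_instance

-- ===== CLAIM (what is proved, stated in full; the proofs are below) =====
def Claim_equal_collapse_pred_labels_py : Prop := ∀ (pred_ids : List Int) (token_labels : List Int) (word_ids : List (Option Int)) (label_list : List String), Dom_collapse_pred_labels_py pred_ids token_labels word_ids label_list → Pre_collapse_pred_labels_py pred_ids token_labels word_ids label_list → Spec_collapse_pred_labels_py pred_ids token_labels word_ids label_list (collapse_pred_labels_py pred_ids token_labels word_ids label_list)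

-- ===== LEMMAS AND PROOFS =====

-- Proof-only normal form both ports are reduced to: the run-first positions of the filtered
-- (position, id) list, given the previously seen id.
def pvRunFirstsRec : List (Int × Int) → Option Int → List Int
  | [], _ => []
  | (i, w) :: rest, prev =>
    if some w ≠ prev then i :: pvRunFirstsRec rest (some w) else pvRunFirstsRec rest prev

-- A's loop emits exactly the labels of the run-first positions of the filtered list.
theorem pvLoopA_eq_runFirsts (pred_ids token_labels : List Int) (label_list : List String) :
    ∀ (l : List (Int × Option Int)) (prev : Option Int),
      pvLoopA pred_ids token_labels label_list l prev =
        (pvRunFirstsRec (l.filterMap (fun p => p.2.map (fun w => (p.1, w)))) prev).filterMap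
          (pvRunEmit pred_ids token_labels label_list) := by
  intro l
  induction l with
  | nil => intro prev; simp [pvLoopA, pvRunFirstsRec]
  | cons hd tl ih =>
    intro prev
    obtain ⟨pos, wid⟩ := hd
    cases wid with
    | none => simp [pvLoopA, ih]
    | some w =>
      by_cases h : some w = prev
      · subst h; simp [pvLoopA, pvRunFirstsRec, ih]
      · have h' : some w ≠ prev := h
        by_cases hg : (PySem.List.pyGet? token_labels pos).getD (-100) ≠ -100
        · simp [pvLoopA, pvRunFirstsRec, h', hg, ih, pvRunEmit]
        · simp [pvLoopA, pvRunFirstsRec, h', hg, ih, pvRunEmit]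

-- Skipping a maximal run of id w and restarting with no previous id computes the same
-- run firsts as continuing with prev = some w.
theorem pvRunFirsts_dropWhile (w : Int) :
    ∀ ys : List (Int × Int),
      pvRunFirstsRec (ys.dropWhile (fun p => p.2 == w)) none = pvRunFirstsRec ys (some w) := by
  intro ys
  induction ys with
  | nil => simp [pvRunFirstsRec]
  | cons y t ih =>
    by_cases h : y.2 = w
    · simpa [List.dropWhile_cons, h, pvRunFirstsRec] using ih
    · simp [List.dropWhile_cons, h, pvRunFirstsRec]

-- B's run-skipping loop emits the labels of the run-first positions (prev = none).
theorem pvRunsLoop_eq_runFirsts (pred_ids token_labels : List Int) (label_list : List String) :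
    ∀ xs : List (Int × Int),
      pvRunsLoop pred_ids token_labels label_list xs =
        (pvRunFirstsRec xs none).filterMap (pvRunEmit pred_ids token_labels label_list) := by
  intro xs
  induction xs using pvRunsLoop.induct pred_ids token_labels label_list with
  | case1 => simp [pvRunsLoop, pvRunFirstsRec]
  | case2 pos wid rest s hE ih =>
    rw [pvRunsLoop]
    simp [pvRunFirstsRec, hE, ih, pvRunFirsts_dropWhile]
  | case3 pos wid rest hE ih =>
    rw [pvRunsLoop]
    simp [pvRunFirstsRec, hE, ih, pvRunFirsts_dropWhile]

-- ===== VERDICT (by name: the statement is the Claim_ definition above) =====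
theorem collapse_pred_labels_py_spec : Claim_equal_collapse_pred_labels_py := by
  intro pred_ids token_labels word_ids label_list _ _
  unfold Spec_collapse_pred_labels_py collapse_pred_labels_py collapse_pred_labels_py_alt
  rw [pvLoopA_eq_runFirsts, pvRunsLoop_eq_runFirsts]
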